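-- pv_equiv track=rewrite | github.com/Byongho96/algorithm_practice | Baekjoon/2960_에라토스테네스의_체.py | eratosthenes_deletion
-- ===== SOURCE A (Python) =====
-- def eratosthenes_deletion(N, K):
--     is_prime = [True] * (N + 1)
--
--     cnt = 0
--     for i in range(2, N + 1):
--         if is_prime[i]:
--             for j in range(i, N + 1, i):
--                 if not is_prime[j]:
--                     continue
--                 is_prime[j] = False
--                 cnt += 1
--                 if cnt == K:
--                     return j
-- ===== SOURCE B (Python) =====
-- def _spf(n):
--     # smallest prime factor of n (n >= 2) by trial division
--     d = 2
--     while d * d <= n: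
--         if n % d == 0:
--             return d
--         d += 1
--     return n
--
-- def eratosthenes_deletion(N, K):
--     # deletions happen grouped by smallest prime factor (ascending), within a
--     # group in ascending value; the packed key spf*(N+1)+n encodes that pair
--     order = sorted(range(2, N + 1), key=lambda n: _spf(n) * (N + 1) + n)
--     if 1 <= K <= len(order):
--         return order[K - 1]
--     return None
-- ===== Notes on version B (the rewrite author's own statement) =====
-- stated objective: alternative
-- what changed: Replaces the mark-and-count sieve with early return by computing each number's smallest prime factor independently via trial division, sorting 2..N by the packed key spf*(N+1)+n (deletion order = ascending (spf, n)), and indexing the K-th entry directly.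
import Mathlib
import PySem

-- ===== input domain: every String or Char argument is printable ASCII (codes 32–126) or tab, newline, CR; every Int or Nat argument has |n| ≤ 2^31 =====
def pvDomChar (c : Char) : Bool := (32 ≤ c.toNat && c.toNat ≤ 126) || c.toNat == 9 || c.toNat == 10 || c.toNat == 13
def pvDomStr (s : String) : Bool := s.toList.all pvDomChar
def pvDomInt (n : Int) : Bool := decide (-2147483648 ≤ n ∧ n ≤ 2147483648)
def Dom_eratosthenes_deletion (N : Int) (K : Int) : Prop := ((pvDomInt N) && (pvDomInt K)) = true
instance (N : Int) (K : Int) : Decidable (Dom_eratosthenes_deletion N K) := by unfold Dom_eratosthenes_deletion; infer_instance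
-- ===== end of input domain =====

-- B replaces A's mark-and-count sieve (early return at the K-th mark) by computing each
-- number's smallest prime factor independently, sorting 2..N by the packed key spf*(N+1)+n
-- and indexing the K-th entry directly (objective: alternative algorithm, not faster).

-- ===== PORT A =====
-- inner loop 'for j in range(i, N+1, i): …' ; .inr j = the early 'return j',
-- .inl (is_prime, cnt) = loop finished.  All list indices Python uses here are in
-- range, so pyGetD/pySetD (total forms) are exact.
def pvAInner (K : Int) : List Int → List Bool → Int → (List Bool × Int) ⊕ Int
  | [], isp, cnt => .inl (isp, cnt)
  | j :: js, isp, cnt =>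
    if PySem.List.pyGetD isp j false = false then
      pvAInner K js isp cnt                              -- continue
    else
      let isp' := PySem.List.pySetD isp j false          -- is_prime[j] = False
      let cnt' := cnt + 1
      if cnt' = K then .inr j else pvAInner K js isp' cnt'

-- outer loop 'for i in range(2, N+1): …'
def pvAOuter (N K : Int) : List Int → List Bool → Int → Option Int
  | [], _, _ => none                                     -- fall through: implicit 'return None'
  | i :: is, isp, cnt =>
    if PySem.List.pyGetD isp i false = true then
      match pvAInner K (PySem.List.pyRange i (N + 1) i) isp cnt with
      | .inr j => some j
      | .inl (isp', cnt') => pvAOuter N K is isp' cnt'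
    else pvAOuter N K is isp cnt

def eratosthenes_deletion (N : Int) (K : Int) : Option Int :=
  -- [True] * (N + 1)  (Python clamps a negative repeat count to the empty list, as toNat does)
  pvAOuter N K (PySem.List.pyRange 2 (N + 1) 1) (List.replicate (N + 1).toNat true) 0

-- ===== PORT B =====
-- _spf(n): trial division 'while d*d <= n: …' (n ≥ 2 at every call site)
def pvSpfLoop (n : Int) (d : Int) : Int :=
  if h : d * d ≤ n then
    if PySem.Int.mod n d = 0 then d else pvSpfLoop n (d + 1)
  else n
termination_by (n + 1 - d).toNat
decreasing_by
  have hd : d ≤ n := by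
    by_cases h1 : 1 ≤ d
    · calc d = d * 1 := (mul_one d).symm
        _ ≤ d * d := by exact mul_le_mul_of_nonneg_left h1 (by omega)
        _ ≤ n := h
    · nlinarith [mul_self_nonneg d]
  omega

def pvSpf (n : Int) : Int := pvSpfLoop n 2

def eratosthenes_deletion_alt (N : Int) (K : Int) : Option Int :=
  let order := PySem.List.sorted (PySem.List.pyRange 2 (N + 1) 1)
      (fun n => pvSpf n * (N + 1) + n) false
  if 1 ≤ K ∧ K ≤ PySem.List.len order then
    PySem.List.pyGet? order (K - 1)                      -- order[K-1] (in range under the guard)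
  else none

-- ===== PRECONDITION & SPEC =====
def Spec_eratosthenes_deletion (N : Int) (K : Int) (out : Option Int) : Prop := out = eratosthenes_deletion_alt N K
instance (N : Int) (K : Int) (out : Option Int) : Decidable (Spec_eratosthenes_deletion N K out) := by unfold Spec_eratosthenes_deletion; infer_instance

-- ===== CLAIM (what is proved, stated in full; the proofs are below) =====
def Claim_equal_eratosthenes_deletion : Prop := ∀ (N : Int) (K : Int), Dom_eratosthenes_deletion N K → Spec_eratosthenes_deletion N K (eratosthenes_deletion N K)

-- ===== LEMMAS AND PROOFS =====

-- smallest prime factor, the mathematical reference both ports are compared against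
def pvF (m : Int) : Int := (m.toNat.minFac : Int)

-- the numbers deleted while processing i, in order: multiples of i whose spf is i
def pvGroup (N i : Int) : List Int :=
  (PySem.List.pyRange i (N + 1) i).filter (fun m => decide (pvF m = i))

-- the whole deletion sequence from stage i on
def pvCanonFrom (N i : Int) : List Int :=
  (PySem.List.pyRange i (N + 1) 1).flatMap (pvGroup N)

-- ---- facts about pvF ----
lemma pvF_dvd (m : Int) (hm : 2 ≤ m) : pvF m ∣ m := by
  have h2 : (m.toNat : Int) = m := Int.toNat_of_nonneg (by omega)
  have h3 : (m.toNat.minFac : Int) ∣ (m.toNat : Int) :=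
    Int.natCast_dvd_natCast.mpr (Nat.minFac_dvd m.toNat)
  rw [h2] at h3
  exact h3

lemma pvF_two_le (m : Int) (hm : 2 ≤ m) : 2 ≤ pvF m := by
  have h1 : m.toNat ≠ 1 := by omega
  have := (Nat.minFac_prime h1).two_le
  simp only [pvF]; omega

lemma pvF_le_of_dvd (m i : Int) (hm : 2 ≤ m) (hi : 2 ≤ i) (h : i ∣ m) : pvF m ≤ i := by
  have hmn : (m.toNat : Int) = m := Int.toNat_of_nonneg (by omega)
  have hin : (i.toNat : Int) = i := Int.toNat_of_nonneg (by omega)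
  have hdvd : i.toNat ∣ m.toNat := by
    rw [← Int.natCast_dvd_natCast, hmn, hin]; exact h
  have := Nat.minFac_le_of_dvd (by omega) hdvd
  simp only [pvF]; omega

lemma pvF_le_self (m : Int) (hm : 2 ≤ m) : pvF m ≤ m :=
  pvF_le_of_dvd m m hm hm dvd_rfl

lemma pvF_prime (m : Int) (hm : 2 ≤ m) : Nat.Prime (pvF m).toNat := by
  have h1 : m.toNat ≠ 1 := by omega
  simpa [pvF] using Nat.minFac_prime h1

lemma pvF_eq_of_prime (i : Int) (hi : 2 ≤ i) (hp : Nat.Prime i.toNat) : pvF i = i := by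
  have := Nat.Prime.minFac_eq hp
  simp only [pvF, this]; omega


-- spf by trial division computes the smallest prime factor
lemma pvSpfLoop_eq (n d : Int) (hn : 2 ≤ n) (hd : 2 ≤ d)
    (hnod : ∀ e : Int, 2 ≤ e → e < d → ¬ e ∣ n) : pvSpfLoop n d = pvF n := by
  fun_induction pvSpfLoop n d with
  | case1 d h hmod =>
    -- returns d, d ∣ n
    have hdvd : d ∣ n := (PySem.Int.mod_eq_zero_iff_dvd n d).mp hmod
    have h1 : pvF n ≤ d := pvF_le_of_dvd n d hn hd hdvd
    have h2 : ¬ pvF n < d := fun hlt => hnod (pvF n) (pvF_two_le n hn) hlt (pvF_dvd n hn)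
    omega
  | case2 d h hmod ih =>
    apply ih (by omega)
    intro e h1 h2
    by_cases he : e = d
    · subst he; intro hdvd; exact hmod ((PySem.Int.mod_eq_zero_iff_dvd n e).mpr hdvd)
    · exact hnod e h1 (by omega)
  | case3 d h =>
    -- d*d > n, no divisor < d: n prime
    have hple : pvF n ≤ n := pvF_le_of_dvd n n hn hn dvd_rfl
    have h2 : ¬ pvF n < d := fun hlt => hnod (pvF n) (pvF_two_le n hn) hlt (pvF_dvd n hn)
    -- so d ≤ pvF n, hence d*d ≤ pvF n * pvF n; if pvF n < n then (pvF n)^2 ≤ n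
    by_cases hp : Nat.Prime n.toNat
    · have := Nat.Prime.minFac_eq hp
      simp only [pvF, this]; omega
    · have hsq : n.toNat.minFac ^ 2 ≤ n.toNat := Nat.minFac_sq_le_self (by omega) hp
      have hge : d ≤ pvF n := by omega
      have : d * d ≤ pvF n * pvF n := by nlinarith [pvF_two_le n hn]
      have hsq' : n.toNat.minFac * n.toNat.minFac ≤ n.toNat := by nlinarith [hsq]
      have hcast : (n.toNat.minFac : Int) * (n.toNat.minFac : Int) ≤ (n.toNat : Int) := by
        exact_mod_cast hsq'
      have hn' : ((n.toNat : Int)) = n := Int.toNat_of_nonneg (by omega)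
      have hdd : d * d ≤ n := by
        calc d * d ≤ pvF n * pvF n := this
          _ ≤ (n.toNat : Int) := by simpa [pvF] using hcast
          _ = n := hn'
      exact absurd hdd h

lemma pvSpf_eq (n : Int) (hn : 2 ≤ n) : pvSpf n = pvF n := by
  exact pvSpfLoop_eq n 2 hn le_rfl (fun e h1 h2 => by omega)

-- membership in a deletion group / in the tail of the deletion sequence
lemma mem_pvGroup {N i x : Int} (hi : 2 ≤ i) :
    x ∈ pvGroup N i ↔ (pvF x = i ∧ 2 ≤ x ∧ x ≤ N) := by
  unfold pvGroup
  rw [List.mem_filter]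
  rw [PySem.List.mem_pyRange_iff_of_pos (by omega) x]
  constructor
  · rintro ⟨⟨h1, h2, h3⟩, h4⟩
    have hF : pvF x = i := by simpa using h4
    exact ⟨hF, by omega, by omega⟩
  · rintro ⟨hF, h2, h3⟩
    have hdvd : i ∣ x := hF ▸ pvF_dvd x h2
    have hle : i ≤ x := hF ▸ pvF_le_self x h2
    exact ⟨⟨hle, by omega, dvd_sub hdvd dvd_rfl⟩, by simpa using hF⟩

lemma mem_pvCanonFrom {N i x : Int} (hi : 2 ≤ i) :
    x ∈ pvCanonFrom N i ↔ (2 ≤ x ∧ x ≤ N ∧ i ≤ pvF x) := by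
  unfold pvCanonFrom
  rw [List.mem_flatMap]
  constructor
  · rintro ⟨p, hp, hx⟩
    rw [PySem.List.mem_pyRange_one] at hp
    rw [mem_pvGroup (by omega)] at hx
    obtain ⟨hF, hx2, hxN⟩ := hx
    exact ⟨hx2, hxN, by omega⟩
  · rintro ⟨hx2, hxN, hiF⟩
    refine ⟨pvF x, ?_, ?_⟩
    · rw [PySem.List.mem_pyRange_one]
      have := pvF_le_self x hx2
      omega
    · rw [mem_pvGroup (by have := pvF_two_le x hx2; omega)]
      exact ⟨rfl, hx2, hxN⟩

lemma pvCanonFrom_nil {N i : Int} (h : N < i) : pvCanonFrom N i = [] := by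
  unfold pvCanonFrom
  rw [PySem.List.pyRange_one_eq_nil (by omega)]
  rfl

lemma pvCanonFrom_cons {N i : Int} (h : i ≤ N) :
    pvCanonFrom N i = pvGroup N i ++ pvCanonFrom N (i + 1) := by
  unfold pvCanonFrom
  rw [PySem.List.pyRange_one_cons (by omega)]
  rw [List.flatMap_cons]

-- pyRange with a positive step is strictly increasing, hence nodup
lemma pvRange_step_pairwise (a b s : Int) (hs : 0 < s) :
    (PySem.List.pyRange a b s).Pairwise (· < ·) := by
  rw [PySem.List.pyRange_of_pos a b hs]
  rw [List.pairwise_map]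
  apply List.Pairwise.imp ?_ (List.pairwise_lt_range)
  intro k1 k2 hk
  have : (k1 : Int) < (k2 : Int) := by exact_mod_cast hk
  have := mul_lt_mul_of_pos_left this hs
  omega

lemma pvRange_step_nodup (a b s : Int) (hs : 0 < s) :
    (PySem.List.pyRange a b s).Nodup :=
  List.Pairwise.imp (fun {x y} (h : x < y) => by omega) (pvRange_step_pairwise a b s hs)


-- the deletion sequence is strictly increasing under the packed key
lemma pvCanon_pairwise (N : Int) :
    (pvCanonFrom N 2).Pairwise (fun a b => pvF a * (N + 1) + a < pvF b * (N + 1) + b) := by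
  unfold pvCanonFrom
  rw [List.pairwise_flatMap]
  constructor
  · intro p hp
    rw [PySem.List.mem_pyRange_one] at hp
    have hp2 : 2 ≤ p := hp.1
    have hpair : (pvGroup N p).Pairwise (· < ·) :=
      List.Pairwise.filter _ (pvRange_step_pairwise p (N + 1) p (by omega))
    refine List.Pairwise.imp_of_mem ?_ hpair
    intro a b ha hb hab
    have hFa : pvF a = p := ((mem_pvGroup hp2).mp ha).1
    have hFb : pvF b = p := ((mem_pvGroup hp2).mp hb).1
    rw [hFa, hFb]
    omega
  · refine List.Pairwise.imp_of_mem ?_ (PySem.List.pairwise_lt_pyRange_one 2 (N + 1))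
    intro p q hp hq hpq x hx y hy
    rw [PySem.List.mem_pyRange_one] at hp hq
    obtain ⟨hFx, hx2, hxN⟩ := (mem_pvGroup (by omega : (2:Int) ≤ p)).mp hx
    obtain ⟨hFy, hy2, hyN⟩ := (mem_pvGroup (by omega : (2:Int) ≤ q)).mp hy
    rw [hFx, hFy]
    have hmul : 1 * (N + 1) ≤ (q - p) * (N + 1) :=
      mul_le_mul_of_nonneg_right (by omega) (by omega)
    nlinarith

lemma pvCanon_nodup (N : Int) : (pvCanonFrom N 2).Nodup := by
  have h := pvCanon_pairwise N
  exact List.Pairwise.imp (fun {a b} hab => by intro he; rw [he] at hab; omega) h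

lemma pvCanon_perm (N : Int) : (pvCanonFrom N 2).Perm (PySem.List.pyRange 2 (N + 1) 1) := by
  rw [List.perm_ext_iff_of_nodup (pvCanon_nodup N) (PySem.List.nodup_pyRange_one 2 (N + 1))]
  intro a
  rw [mem_pvCanonFrom le_rfl, PySem.List.mem_pyRange_one]
  constructor
  · rintro ⟨h1, h2, _⟩; omega
  · rintro ⟨h1, h2⟩
    exact ⟨h1, by omega, pvF_two_le a h1⟩

-- B's sorted order IS the deletion sequence
lemma pvSorted_eq_canon (N : Int) :
    PySem.List.sorted (PySem.List.pyRange 2 (N + 1) 1)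
      (fun n => pvSpf n * (N + 1) + n) false = pvCanonFrom N 2 := by
  apply PySem.List.sorted_eq_of_perm_of_pairwise_lt
  · exact pvCanon_perm N
  · refine List.Pairwise.imp_of_mem ?_ (pvCanon_pairwise N)
    intro a b ha hb hab
    have ha2 : 2 ≤ a := ((mem_pvCanonFrom le_rfl).mp ha).1
    have hb2 : 2 ≤ b := ((mem_pvCanonFrom le_rfl).mp hb).1
    simpa [pvSpf_eq a ha2, pvSpf_eq b hb2] using hab

lemma pvAlt_eq (N K : Int) :
    eratosthenes_deletion_alt N K =
      if 1 ≤ K ∧ K ≤ ((pvCanonFrom N 2).length : Int) then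
        some ((pvCanonFrom N 2).getD (K - 1).toNat 0)
      else none := by
  unfold eratosthenes_deletion_alt
  simp only [pvSorted_eq_canon, PySem.List.len_eq]
  split_ifs with h
  · rw [PySem.List.pyGet?_eq_some_getElem _ (by omega) (by omega)]
    rw [List.getD_eq_getElem _ _ (by omega)]
  · rfl

-- ---- A-side: loop invariant ----
-- state of is_prime when every stage < i is fully processed and, within stage i,
-- exactly the elements of `done` are already marked
def pvSt (N i : Int) (done : List Int) (isp : List Bool) : Prop :=
  isp.length = (N + 1).toNat ∧
  ∀ j : Int, 0 ≤ j → j ≤ N →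
    (PySem.List.pyGetD isp j false = true ↔ (j < 2 ∨ (i ≤ pvF j ∧ j ∉ done)))

lemma pvSt_step (N i : Int) (_hi : 2 ≤ i) (isp : List Bool) (del : List Int)
    (hdel : ∀ j : Int, 2 ≤ j → j ≤ N → (pvF j = i ↔ j ∈ del))
    (h : pvSt N i del isp) : pvSt N (i + 1) [] isp := by
  obtain ⟨hlen, hflag⟩ := h
  refine ⟨hlen, ?_⟩
  intro j h0 hN
  rw [hflag j h0 hN]
  by_cases hj2 : j < 2
  · simp [hj2]
  · have h2j : 2 ≤ j := by omega
    have hiff := hdel j h2j hN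
    simp only [List.not_mem_nil, not_false_iff, and_true]
    constructor
    · rintro (hlt | ⟨hle, hnm⟩)
      · omega
      · right
        have : pvF j ≠ i := fun hF => hnm (hiff.mp hF)
        omega
    · rintro (hlt | hle)
      · omega
      · right
        refine ⟨by omega, fun hm => ?_⟩
        have : pvF j = i := hiff.mpr hm
        omega

-- reading / writing the boolean array at nonnegative Int indices
lemma pvGetSet (xs : List Bool) (a b : Int) (v : Bool) (ha : 0 ≤ a) (hb : 0 ≤ b)
    (hlt : a < (xs.length : Int)) :
    PySem.List.pyGetD (PySem.List.pySetD xs a v) b false =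
      if b = a then v else PySem.List.pyGetD xs b false := by
  have ha' : a = ((a.toNat : Nat) : Int) := (Int.toNat_of_nonneg ha).symm
  have hb' : b = ((b.toNat : Nat) : Int) := (Int.toNat_of_nonneg hb).symm
  rw [ha', hb', PySem.List.pyGetD_pySetD_natCast xs a.toNat b.toNat v false (by omega)]
  by_cases h : b = a
  · rw [if_pos (by omega), if_pos (by rw [← ha', ← hb']; exact h)]
  · rw [if_neg (by omega), if_neg (by rw [← ha', ← hb']; exact h)]

lemma pvAInner_spec (N K i : Int) (hi : 2 ≤ i) :
    ∀ (js done : List Int) (isp : List Bool) (cnt : Int),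
    js.Nodup →
    (∀ j ∈ js, 2 ≤ j ∧ j ≤ N ∧ i ∣ j ∧ j ∉ done) →
    pvSt N i done isp → 0 ≤ cnt → ¬(1 ≤ K ∧ K ≤ cnt) →
    (if 1 ≤ K ∧ K ≤ cnt + ((js.filter (fun j => decide (pvF j = i))).length : Int) then
       pvAInner K js isp cnt =
         .inr ((js.filter (fun j => decide (pvF j = i))).getD (K - cnt - 1).toNat 0)
     else ∃ isp', pvAInner K js isp cnt =
         .inl (isp', cnt + ((js.filter (fun j => decide (pvF j = i))).length : Int)) ∧
         pvSt N i (done ++ js.filter (fun j => decide (pvF j = i))) isp') := by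
  intro js
  induction js with
  | nil =>
    intro done isp cnt hnd hjs hst hcnt hK
    simp only [List.filter_nil, List.length_nil, Nat.cast_zero, add_zero]
    rw [if_neg hK]
    exact ⟨isp, rfl, by simpa using hst⟩
  | cons j js ih =>
    intro done isp cnt hnd hjs hst hcnt hK
    obtain ⟨hj2, hjN, hjdvd, hjdone⟩ := hjs j List.mem_cons_self
    have hjs' : ∀ a ∈ js, 2 ≤ a ∧ a ≤ N ∧ i ∣ a ∧ a ∉ done :=
      fun a ha => hjs a (List.mem_cons_of_mem _ ha)
    have hjnotin : j ∉ js := (List.nodup_cons.mp hnd).1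
    have hnd' : js.Nodup := (List.nodup_cons.mp hnd).2
    obtain ⟨hlen, hflag⟩ := hst
    have hj0 : (0:Int) ≤ j := by omega
    have hFj_le : pvF j ≤ i := pvF_le_of_dvd j i hj2 hi hjdvd
    have hflagj := hflag j hj0 hjN
    by_cases hFj : pvF j = i
    · -- still unmarked: A deletes j here
      have hft : PySem.List.pyGetD isp j false = true := by
        rw [hflagj]; right; exact ⟨by omega, hjdone⟩
      have hfilter : (j :: js).filter (fun j => decide (pvF j = i)) =
          j :: js.filter (fun j => decide (pvF j = i)) := by
        simp [hFj]
      by_cases hKeq : cnt + 1 = K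
      · -- early return: this is the K-th deletion
        rw [hfilter, if_pos (by simp; omega)]
        simp only [pvAInner, hft]
        rw [if_neg (by simp), if_pos hKeq]
        have : (K - cnt - 1).toNat = 0 := by omega
        rw [this, List.getD_cons_zero]
      · -- mark j and continue scanning
        have hst' : pvSt N i (done ++ [j]) (PySem.List.pySetD isp j false) := by
          refine ⟨by rw [PySem.List.length_pySetD]; exact hlen, ?_⟩
          intro jj h0 hN
          rw [pvGetSet isp j jj false hj0 h0 (by omega)]
          by_cases hjj : jj = j
          · subst hjj
            rw [if_pos rfl]
            constructor
            · intro h; exact absurd h (by simp)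
            · rintro (h1 | ⟨_, h2⟩)
              · omega
              · exact absurd ((by simp : jj ∈ done ++ [jj])) h2 |> False.elim
          · rw [if_neg hjj, hflag jj h0 hN]
            simp only [List.mem_append, List.mem_singleton]
            constructor
            · rintro (h1 | ⟨h2, h3⟩)
              · exact Or.inl h1
              · exact Or.inr ⟨h2, by tauto⟩
            · rintro (h1 | ⟨h2, h3⟩)
              · exact Or.inl h1
              · exact Or.inr ⟨h2, by tauto⟩
        have hjs'' : ∀ a ∈ js, 2 ≤ a ∧ a ≤ N ∧ i ∣ a ∧ a ∉ done ++ [j] := by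
          intro a ha
          obtain ⟨h1, h2, h3, h4⟩ := hjs' a ha
          refine ⟨h1, h2, h3, ?_⟩
          simp only [List.mem_append, List.mem_singleton]
          rintro (h5 | h5)
          · exact h4 h5
          · exact hjnotin (h5 ▸ ha)
        have hK' : ¬(1 ≤ K ∧ K ≤ cnt + 1) := by omega
        have := ih (done ++ [j]) (PySem.List.pySetD isp j false) (cnt + 1)
          hnd' hjs'' hst' (by omega) hK'
        rw [hfilter]
        simp only [List.length_cons] at *
        by_cases hKin : 1 ≤ K ∧ K ≤ cnt + ((js.filter (fun j => decide (pvF j = i))).length + 1 : Nat)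
        · rw [if_pos (by push_cast; push_cast at hKin; omega)]
          rw [if_pos (by push_cast at hKin ⊢; omega)] at this
          simp only [pvAInner, hft]
          rw [if_neg (by simp), if_neg hKeq, this]
          congr 1
          have hKge : cnt + 2 ≤ K := by push_cast at hKin; omega
          have h1 : (K - cnt - 1).toNat = (K - (cnt + 1) - 1).toNat + 1 := by omega
          rw [h1, List.getD_cons_succ]
        · rw [if_neg (by push_cast; push_cast at hKin; omega)]
          rw [if_neg (by push_cast at hKin ⊢; omega)] at this
          obtain ⟨isp', heq, hst''⟩ := this
          refine ⟨isp', ?_, ?_⟩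
          · simp only [pvAInner, hft]
            rw [if_neg (by simp), if_neg hKeq, heq]
            congr 2
            push_cast
            ring
          · have : done ++ j :: js.filter (fun j => decide (pvF j = i)) =
                (done ++ [j]) ++ js.filter (fun j => decide (pvF j = i)) := by
              simp
            rw [this]
            exact hst''
    · -- already marked (spf j < i): A skips j
      have hff : PySem.List.pyGetD isp j false = false := by
        cases hvb : PySem.List.pyGetD isp j false with
        | false => rfl
        | true =>
          rw [hvb] at hflagj
          have := hflagj.mp rfl
          rcases this with h1 | ⟨h2, _⟩
          · omega
          · exact absurd (by omega : pvF j = i) hFj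
      have hfilter : (j :: js).filter (fun j => decide (pvF j = i)) =
          js.filter (fun j => decide (pvF j = i)) := by
        simp [hFj]
      rw [hfilter]
      have := ih done isp cnt hnd' hjs' ⟨hlen, hflag⟩ hcnt hK
      by_cases hKin : 1 ≤ K ∧ K ≤ cnt + ((js.filter (fun j => decide (pvF j = i))).length : Int)
      · rw [if_pos hKin]
        rw [if_pos hKin] at this
        simp only [pvAInner, hff]
        exact this
      · rw [if_neg hKin]
        rw [if_neg hKin] at this
        obtain ⟨isp', heq, hst''⟩ := this
        exact ⟨isp', by simp only [pvAInner, hff]; exact heq, hst''⟩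

lemma pvAOuter_spec (N K : Int) : ∀ (m : Nat) (i : Int) (isp : List Bool) (cnt : Int),
    (N + 1 - i).toNat = m → 2 ≤ i → 0 ≤ cnt → pvSt N i [] isp → ¬(1 ≤ K ∧ K ≤ cnt) →
    pvAOuter N K (PySem.List.pyRange i (N + 1) 1) isp cnt =
      if 1 ≤ K ∧ K ≤ cnt + ((pvCanonFrom N i).length : Int) then
        some ((pvCanonFrom N i).getD (K - cnt - 1).toNat 0)
      else none := by
  intro m
  induction m using Nat.strong_induction_on with
  | _ m ih =>
    intro i isp cnt hm hi hcnt hst hK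
    by_cases hiN : N < i
    · rw [PySem.List.pyRange_one_eq_nil (by omega), pvCanonFrom_nil hiN]
      simp only [pvAOuter, List.length_nil, Nat.cast_zero, add_zero]
      rw [if_neg hK]
    · have hiN' : i ≤ N := by omega
      rw [PySem.List.pyRange_one_cons (by omega)]
      obtain ⟨hlen, hflag⟩ := hst
      have hflagi := hflag i (by omega) hiN'
      rw [pvCanonFrom_cons hiN']
      have hFile : pvF i ≤ i := pvF_le_self i hi
      have hprime_of_eq : ∀ j : Int, 2 ≤ j → pvF j = i → pvF i = i := by
        intro j h2 hF
        apply pvF_eq_of_prime i hi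
        have hp := pvF_prime j h2
        rw [hF] at hp
        exact hp
      by_cases hFi : pvF i = i
      · -- i is prime: A runs the inner loop
        have hft : PySem.List.pyGetD isp i false = true := by
          rw [hflagi]; right; exact ⟨by omega, by simp⟩
        have hjsprops : ∀ j ∈ PySem.List.pyRange i (N + 1) i,
            2 ≤ j ∧ j ≤ N ∧ i ∣ j ∧ j ∉ ([] : List Int) := by
          intro j hj
          rw [PySem.List.mem_pyRange_iff_of_pos (by omega) j] at hj
          obtain ⟨h1, h2, h3⟩ := hj
          refine ⟨by omega, by omega, ?_, by simp⟩
          have : i ∣ j - i + i := dvd_add h3 dvd_rfl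
          simpa using this
        have hinner := pvAInner_spec N K i hi (PySem.List.pyRange i (N + 1) i) [] isp cnt
          (pvRange_step_nodup i (N + 1) i (by omega)) hjsprops ⟨hlen, hflag⟩ hcnt hK
        have hdel : (PySem.List.pyRange i (N + 1) i).filter (fun j => decide (pvF j = i)) =
            pvGroup N i := rfl
        rw [hdel] at hinner
        by_cases hKin : 1 ≤ K ∧ K ≤ cnt + ((pvGroup N i).length : Int)
        · rw [if_pos hKin] at hinner
          simp only [pvAOuter, hft, hinner]
          have hc : 1 ≤ K ∧ K ≤ cnt + ((pvGroup N i ++ pvCanonFrom N (i + 1)).length : Int) := by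
            rw [List.length_append]; push_cast; omega
          rw [if_pos hc, List.getD_append _ _ _ _ (by omega)]
          simp
        · rw [if_neg hKin] at hinner
          obtain ⟨isp', heq, hst'⟩ := hinner
          simp only [pvAOuter, hft, heq]
          have hst2 : pvSt N (i + 1) [] isp' := by
            apply pvSt_step N i hi isp' (pvGroup N i)
            · intro j h2 hN
              rw [mem_pvGroup hi]
              constructor
              · intro hF; exact ⟨hF, h2, hN⟩
              · rintro ⟨hF, _, _⟩; exact hF
            · simpa using hst'
          have hrec := ih (N + 1 - (i + 1)).toNat (by omega) (i + 1) isp'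
            (cnt + ((pvGroup N i).length : Int)) rfl (by omega) (by omega) hst2 hKin
          rw [hrec]
          by_cases hKin2 : 1 ≤ K ∧
              K ≤ cnt + ((pvGroup N i).length : Int) + ((pvCanonFrom N (i + 1)).length : Int)
          · have hc : 1 ≤ K ∧ K ≤ cnt + ((pvGroup N i ++ pvCanonFrom N (i + 1)).length : Int) := by
              rw [List.length_append]; push_cast; omega
            rw [if_pos hKin2, if_pos hc]
            have hge : (pvGroup N i).length ≤ (K - cnt - 1).toNat := by omega
            have hidx : (K - (cnt + ((pvGroup N i).length : Int)) - 1).toNat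
                = (K - cnt - 1).toNat - (pvGroup N i).length := by omega
            rw [List.getD_append_right _ _ _ _ hge, ← hidx]
            simp
          · have hc : ¬(1 ≤ K ∧ K ≤ cnt + ((pvGroup N i ++ pvCanonFrom N (i + 1)).length : Int)) := by
              rw [List.length_append]; push_cast; omega
            rw [if_neg hKin2, if_neg hc]
            simp
      · -- i is composite: already marked, A skips the stage entirely
        have hff : PySem.List.pyGetD isp i false = false := by
          cases hvb : PySem.List.pyGetD isp i false with
          | false => rfl
          | true =>
            rw [hvb] at hflagi
            rcases hflagi.mp rfl with h1 | ⟨h2, _⟩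
            · omega
            · exact absurd (by omega : pvF i = i) hFi
        have hgroupnil : pvGroup N i = [] := by
          rw [List.eq_nil_iff_forall_not_mem]
          intro x hx
          obtain ⟨hF, hx2, _⟩ := (mem_pvGroup hi).mp hx
          exact hFi (hprime_of_eq x hx2 hF)
        have hst2 : pvSt N (i + 1) [] isp := by
          apply pvSt_step N i hi isp []
          · intro j h2 hN
            simp only [List.not_mem_nil, iff_false]
            intro hF
            exact hFi (hprime_of_eq j h2 hF)
          · exact ⟨hlen, fun j a b => by rw [hflag j a b]⟩
        have hrec := ih (N + 1 - (i + 1)).toNat (by omega) (i + 1) isp cnt rfl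
          (by omega) hcnt hst2 hK
        simp only [pvAOuter, hff]
        rw [if_neg (by simp)]
        rw [hrec, hgroupnil]
        simp


-- ===== VERDICT (by name: the statement is the Claim_ definition above) =====
theorem eratosthenes_deletion_spec : Claim_equal_eratosthenes_deletion := by
  intro N K _
  unfold Spec_eratosthenes_deletion
  have hA : eratosthenes_deletion N K =
      if 1 ≤ K ∧ K ≤ 0 + ((pvCanonFrom N 2).length : Int) then
        some ((pvCanonFrom N 2).getD (K - 0 - 1).toNat 0)
      else none := by
    unfold eratosthenes_deletion
    apply pvAOuter_spec N K (N + 1 - 2).toNat 2 _ 0 rfl le_rfl le_rfl _ (by omega)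
    constructor
    · simp
    · intro j h0 hN
      have hjlen : j < ((List.replicate (N + 1).toNat true).length : Int) := by
        simp; omega
      rw [PySem.List.pyGetD_eq_getElem _ _ h0 hjlen]
      simp only [List.getElem_replicate]
      constructor
      · intro _
        by_cases hj2 : j < 2
        · exact Or.inl hj2
        · exact Or.inr ⟨pvF_two_le j (by omega), by simp⟩
      · intro _; trivial
  rw [hA, pvAlt_eq]
  simp only [sub_zero, zero_add]
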